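-- pv_equiv track=rewrite | github.com/pawelciupka/STUDIA-BigData | Task2/main.py | user_with_friends_to_friendship_level_tuples_list
-- ===== SOURCE A (Python) =====
-- import itertools
--
-- def user_with_friends_to_friendship_level_tuples_list(user_with_friends):
--     user_id = user_with_friends[0]
--     user_friends = user_with_friends[1]
--
--     friendship_levels = []
--
--     for friend_id in user_friends:
--         key = (user_id, friend_id)
--         if user_id > friend_id:
--             key = (friend_id, user_id)
--         # friends
--         friendship_levels.append((key, 0))
--
--     for friend_pair in itertools.combinations(user_friends, 2):
--         friend_0 = friend_pair[0]
--         friend_1 = friend_pair[1]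
--
--         key = (friend_0, friend_1)
--         if friend_0 > friend_1:
--             key = (friend_1, friend_0)
--         # mutual friends
--         friendship_levels.append((key, 1))
--
--     return friendship_levels
-- ===== SOURCE B (Python) =====
-- import itertools
--
-- def user_with_friends_to_friendship_level_tuples_list(user_with_friends):
--     user_id = user_with_friends[0]
--     elements = [user_id] + list(user_with_friends[1])
--     result = []
--     for (i, a), (_j, b) in itertools.combinations(enumerate(elements), 2):
--         key = (a, b) if a <= b else (b, a)
--         result.append((key, 0 if i == 0 else 1))
--     return result
-- ===== Notes on version B (the rewrite author's own statement) =====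
-- stated objective: simpler
-- what changed: Replaces A's two separate passes (friend loop for level 0, then combinations of friends for level 1) with a single pass over combinations of the enumerated list [user_id]+friends, deriving the level from whether the first index is 0.
import Mathlib
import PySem

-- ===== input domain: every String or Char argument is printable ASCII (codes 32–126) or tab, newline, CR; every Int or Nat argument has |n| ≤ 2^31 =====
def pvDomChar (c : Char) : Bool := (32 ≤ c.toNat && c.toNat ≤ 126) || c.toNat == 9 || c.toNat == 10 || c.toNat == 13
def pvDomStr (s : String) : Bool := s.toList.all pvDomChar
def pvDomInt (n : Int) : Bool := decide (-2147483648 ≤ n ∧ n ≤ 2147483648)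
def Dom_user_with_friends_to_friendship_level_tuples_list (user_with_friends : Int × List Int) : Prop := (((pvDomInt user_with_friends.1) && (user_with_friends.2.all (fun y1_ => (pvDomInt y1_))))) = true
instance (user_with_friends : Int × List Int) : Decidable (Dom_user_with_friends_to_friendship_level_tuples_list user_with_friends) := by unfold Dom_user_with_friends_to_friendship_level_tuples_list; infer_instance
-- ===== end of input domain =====

-- B replaces A's two passes (friends, then friend pairs) by one pass over
-- combinations of the enumerated list [user_id] + friends: simpler decomposition,
-- same cost. Return values proved equal on the whole domain.

-- ===== PORT A =====
def user_with_friends_to_friendship_level_tuples_list (user_with_friends : Int × List Int) : List ((Int × Int) × Int) :=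
  let user_id := user_with_friends.1
  let user_friends := user_with_friends.2
  let friendship_levels : List ((Int × Int) × Int) := []
  let friendship_levels := user_friends.foldl (fun acc friend_id =>
      let key := (user_id, friend_id)
      let key := if user_id > friend_id then (friend_id, user_id) else key
      acc ++ [(key, 0)]) friendship_levels
  let friendship_levels := (PySem.List.combinations user_friends 2).foldl (fun acc friend_pair =>
      -- friend_pair[0] / friend_pair[1]: every element of combinations _ 2 has length 2,
      -- so both indices are in range and pyGetD's default is never used (exact here)
      let friend_0 := PySem.List.pyGetD friend_pair 0 0
      let friend_1 := PySem.List.pyGetD friend_pair 1 0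
      let key := (friend_0, friend_1)
      let key := if friend_0 > friend_1 then (friend_1, friend_0) else key
      acc ++ [(key, 1)]) friendship_levels
  friendship_levels

-- ===== PORT B =====
def user_with_friends_to_friendship_level_tuples_list_alt (user_with_friends : Int × List Int) : List ((Int × Int) × Int) :=
  let user_id := user_with_friends.1
  let elements := user_id :: user_with_friends.2
  (PySem.List.combinations (PySem.List.enumerate elements 0) 2).foldl (fun acc c =>
      -- tuple unpacking '(i, a), (_j, b)': each element of combinations _ 2 has
      -- length exactly 2, so this destructuring is exact (the catch-all is unreachable)
      match c with
      | (i, a) :: (_j, b) :: _ =>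
        let key := if a ≤ b then (a, b) else (b, a)
        acc ++ [(key, if i = 0 then 0 else 1)]
      | _ => acc) []

-- ===== PRECONDITION & SPEC =====
def Spec_user_with_friends_to_friendship_level_tuples_list (user_with_friends : Int × List Int) (out : List ((Int × Int) × Int)) : Prop := out = user_with_friends_to_friendship_level_tuples_list_alt user_with_friends
instance (user_with_friends : Int × List Int) (out : List ((Int × Int) × Int)) : Decidable (Spec_user_with_friends_to_friendship_level_tuples_list user_with_friends out) := by unfold Spec_user_with_friends_to_friendship_level_tuples_list; infer_instance

-- ===== CLAIM (what is proved, stated in full; the proofs are below) =====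
def Claim_equal_user_with_friends_to_friendship_level_tuples_list : Prop := ∀ (user_with_friends : Int × List Int), Dom_user_with_friends_to_friendship_level_tuples_list user_with_friends → Spec_user_with_friends_to_friendship_level_tuples_list user_with_friends (user_with_friends_to_friendship_level_tuples_list user_with_friends)

-- ===== LEMMAS AND PROOFS =====

-- a fold whose body appends a per-element list equals acc ++ flatMap
theorem pv_foldl_flatMap' {α β : Type} (l : List α) (f : List β → α → List β) (g : α → List β)
    (h : ∀ acc x, f acc x = acc ++ g x) (acc : List β) :
    l.foldl f acc = acc ++ l.flatMap g := by
  induction l generalizing acc with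
  | nil => simp
  | cons x t ih => simp [h, ih, List.append_assoc]

-- a fold appending per-element lists equals acc ++ flatMap
theorem pv_foldl_flatMap {α β : Type} (l : List α) (g : α → List β) (acc : List β) :
    l.foldl (fun acc x => acc ++ g x) acc = acc ++ l.flatMap g := by
  induction l generalizing acc with
  | nil => simp
  | cons x t ih => simp [ih, List.append_assoc]

-- flatMap through enumerate when the body only uses the value component
theorem pv_flatMap_enumerate_snd {β : Type} (fs : List Int) (F : Int → List β) (s : Int) :
    (PySem.List.enumerate fs s).flatMap (fun p => F p.2) = fs.flatMap F := by
  induction fs generalizing s with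
  | nil => simp [PySem.List.enumerate_nil]
  | cons x t ih => simp [PySem.List.enumerate_cons, ih]

-- flatMap congruence on members
theorem pv_flatMap_congr {α β : Type} (l : List α) (f h : α → List β)
    (H : ∀ a ∈ l, f a = h a) : l.flatMap f = l.flatMap h := by
  simp only [List.flatMap_def]; rw [List.map_congr_left H]

-- any member of a combination of an enumeration (from 1) has a positive index
theorem pv_idx_pos (fs : List Int) (c : List (Int × Int))
    (hc : c ∈ PySem.List.combinations (PySem.List.enumerate fs 1) 2)
    (p : Int × Int) (hp : p ∈ c) : p.1 ≠ 0 := by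
  have hsub := PySem.List.sublist_of_mem_combinations hc
  have hmem : p ∈ PySem.List.enumerate fs 1 := hsub.mem hp
  rw [PySem.List.mem_enumerate_iff] at hmem
  obtain ⟨k, hk, rfl⟩ := hmem
  simp; omega

-- ===== VERDICT (by name: the statement is the Claim_ definition above) =====
theorem user_with_friends_to_friendship_level_tuples_list_spec : Claim_equal_user_with_friends_to_friendship_level_tuples_list := by
  intro uf _
  obtain ⟨u, fs⟩ := uf
  show user_with_friends_to_friendship_level_tuples_list (u, fs) =
       user_with_friends_to_friendship_level_tuples_list_alt (u, fs)
  unfold user_with_friends_to_friendship_level_tuples_list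
    user_with_friends_to_friendship_level_tuples_list_alt
  simp only []
  -- normalise both sides' match-style fold bodies to "acc ++ g x" form
  have hgB : ∀ (acc : List ((Int × Int) × Int)) (c : List (Int × Int)),
      (match c with
      | (i, a) :: (_j, b) :: _ =>
        acc ++ [((if a ≤ b then (a, b) else (b, a)), if i = 0 then (0 : Int) else 1)]
      | _ => acc) = acc ++ (match c with
      | (i, a) :: (_j, b) :: _ =>
        [((if a ≤ b then (a, b) else (b, a)), if i = 0 then (0 : Int) else 1)]
      | _ => []) := by
    intro acc c
    rcases c with _ | ⟨⟨i, a⟩, _ | ⟨⟨j, b⟩, t⟩⟩ <;> simp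
  rw [pv_foldl_flatMap' (PySem.List.combinations (PySem.List.enumerate (u :: fs) 0) 2) _ _ hgB,
      pv_foldl_flatMap, pv_foldl_flatMap]
  simp only [List.nil_append]
  -- unfold B's combinations over the cons'd enumeration
  rw [PySem.List.enumerate_cons, PySem.List.combinations_cons_succ,
      PySem.List.combinations_one, List.flatMap_append, List.map_map, List.flatMap_map]
  congr 1
  · -- level-0 part
    rw [show (fs.flatMap fun friend_id =>
          [((if u > friend_id then (friend_id, u) else (u, friend_id)), (0 : Int))]) =
        (PySem.List.enumerate fs 1).flatMap (fun p =>
          [((if u > p.2 then (p.2, u) else (u, p.2)), (0 : Int))]) from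
      (pv_flatMap_enumerate_snd fs _ 1).symm]
    apply pv_flatMap_congr
    intro p _
    simp only [Function.comp]
    by_cases h : u ≤ p.2
    · simp [h, not_lt.mpr h]
    · simp [h, lt_of_not_ge h]
  · -- level-1 part
    have hfs : fs = (PySem.List.enumerate fs 1).map Prod.snd := by
      rw [PySem.List.map_snd_enumerate]
    conv_lhs => rw [hfs]
    rw [PySem.List.combinations_map, List.flatMap_map]
    apply pv_flatMap_congr
    intro c hc
    rcases hlen : c with _ | ⟨⟨i, a⟩, _ | ⟨⟨j, b⟩, t⟩⟩
    · have := PySem.List.length_of_mem_combinations hc; simp [hlen] at this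
    · have := PySem.List.length_of_mem_combinations hc; simp [hlen] at this
    · have h0 : i ≠ 0 := pv_idx_pos fs _ (hlen ▸ hc) (i, a) (by simp)
      simp only [List.map_cons]
      by_cases h : a ≤ b
      · simp [PySem.List.pyGetD_ofNat', h0, h, not_lt.mpr h]
      · simp [PySem.List.pyGetD_ofNat', h0, h, lt_of_not_ge h]
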